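-- pv_equiv track=rewrite | github.com/VitorEmanuelDSV/ProcessamentoImagens | src/algorithms/morphological.py | apply_hit_or_miss
-- ===== SOURCE A (Python) =====
-- def _apply_binary_erosion(binary_matrix, kernel):
--     """Aplica erosão com um kernel específico em uma imagem binária (0 ou 1)."""
--     height = len(binary_matrix)
--     width = len(binary_matrix[0])
--     kh, kw = len(kernel), len(kernel[0])
--     offset_y, offset_x = kh // 2, kw // 2
--
--     eroded_image = [[0 for _ in range(width)] for _ in range(height)]
--
--     for y in range(offset_y, height - offset_y):
--         for x in range(offset_x, width - offset_x):
--             match = True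
--             for i in range(kh):
--                 for j in range(kw):
--                     if kernel[i][j] == 1:
--                         if binary_matrix[y + i - offset_y][x + j - offset_x] == 0:
--                             match = False
--                             break
--                 if not match:
--                     break
--             if match:
--                 eroded_image[y][x] = 1
--
--     return eroded_image
--
-- def apply_hit_or_miss(binary_matrix, kernel_j, kernel_k):
--     """
--     Aplica o operador Hit-or-Miss.
--     A imagem deve ser binária (0s e 1s).
--     A = imagem original.
--     A^c = complemento da imagem.
--     Resultado = (A erodido por J) INTERSEÇÃO (A^c erodido por K)
--     """
--     # 1. Erosão da imagem original pelo kernel J (Hit)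
--     erosion_j = _apply_binary_erosion(binary_matrix, kernel_j)
--
--     # 2. Criação do complemento da imagem
--     complement_matrix = [[1 - pixel for pixel in row] for row in binary_matrix]
--
--     # 3. Erosão do complemento pelo kernel K (Miss)
--     erosion_k = _apply_binary_erosion(complement_matrix, kernel_k)
--
--     # 4. Interseção (AND) dos dois resultados
--     height = len(binary_matrix)
--     width = len(binary_matrix[0])
--     result = [[0 for _ in range(width)] for _ in range(height)]
--     for y in range(height):
--         for x in range(width):
--             if erosion_j[y][x] == 1 and erosion_k[y][x] == 1:
--                 result[y][x] = 1
--
--     return result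
-- ===== SOURCE B (Python) =====
-- def apply_hit_or_miss(binary_matrix, kernel_j, kernel_k):
--     """Fused hit-or-miss: one pass over the pixels, no intermediate erosion
--     or complement matrices."""
--     height = len(binary_matrix)
--     width = len(binary_matrix[0])
--
--     def match(y, x, kernel, is_hit):
--         kh, kw = len(kernel), len(kernel[0])
--         oy, ox = kh // 2, kw // 2
--         if not (oy <= y and y + oy < height and ox <= x and x + ox < width):
--             return False
--         return all(kernel[i][j] != 1
--                    or (binary_matrix[y + i - oy][x + j - ox] != 0 if is_hit
--                        else binary_matrix[y + i - oy][x + j - ox] != 1)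
--                    for i in range(kh) for j in range(kw))
--
--     return [[1 if match(y, x, kernel_j, True) and match(y, x, kernel_k, False) else 0
--              for x in range(width)] for y in range(height)]
-- ===== Notes on version B (the rewrite author's own statement) =====
-- stated objective: simpler
-- what changed: B fuses the whole operation into a single per-pixel pass built as a comprehension: for each (y,x) it tests the hit kernel against the image and the miss kernel against the background inline, instead of allocating two erosion matrices plus an explicit complement matrix and then intersecting them in a fourth pass.
-- outside the precondition, e.g. on apply_hit_or_miss([[0]], [[1, 1], [1]], [[1]]): A returns [[0]], B returns [[0]]
import Mathlib
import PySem

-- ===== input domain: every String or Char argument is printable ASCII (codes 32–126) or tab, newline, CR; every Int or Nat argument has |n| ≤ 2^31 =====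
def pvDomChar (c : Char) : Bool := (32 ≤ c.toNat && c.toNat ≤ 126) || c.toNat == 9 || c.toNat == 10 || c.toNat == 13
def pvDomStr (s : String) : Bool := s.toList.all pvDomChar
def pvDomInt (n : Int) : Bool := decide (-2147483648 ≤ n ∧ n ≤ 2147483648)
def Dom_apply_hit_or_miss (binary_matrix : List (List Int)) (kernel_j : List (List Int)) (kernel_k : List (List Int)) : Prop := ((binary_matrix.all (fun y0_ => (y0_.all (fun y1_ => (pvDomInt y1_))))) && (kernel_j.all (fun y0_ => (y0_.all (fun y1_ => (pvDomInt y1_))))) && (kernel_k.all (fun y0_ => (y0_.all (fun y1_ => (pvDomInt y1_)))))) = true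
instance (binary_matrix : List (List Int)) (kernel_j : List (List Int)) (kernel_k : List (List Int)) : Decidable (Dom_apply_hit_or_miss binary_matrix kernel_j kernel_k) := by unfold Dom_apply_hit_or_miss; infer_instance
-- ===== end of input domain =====

-- B fuses hit-or-miss into one per-pixel pass (no intermediate erosion/complement matrices); objective: simpler.

-- shared 2-D indexing helper (plain indexing; every access is in range on Pre_)
def pvGet2 (m : List (List Int)) (y x : Nat) : Int := (m.getD y []).getD x 0

-- ===== PORT A =====
-- the nested i/j kernel loops of _apply_binary_erosion, with Python's `break` as a short-circuiting fold
def pvMatchA (bm kernel : List (List Int)) (oy ox y x : Nat) : Bool :=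
  (List.range kernel.length).foldl (fun mt i =>
    if mt then
      (List.range (kernel.getD 0 []).length).foldl (fun mt2 j =>
        if mt2 then
          if pvGet2 kernel i j == 1 then
            if pvGet2 bm (y + i - oy) (x + j - ox) == 0 then false else true
          else true
        else mt2) mt
    else mt) true

-- _apply_binary_erosion: zero matrix, then in-place writes inside the bordered y/x ranges
def pvErosion (bm kernel : List (List Int)) : List (List Int) :=
  let height := bm.length
  let width := (bm.getD 0 []).length
  let oy := kernel.length / 2
  let ox := (kernel.getD 0 []).length / 2
  (List.range' oy (height - oy - oy)).foldl (fun er y =>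
    er.modify y (fun row =>
      (List.range' ox (width - ox - ox)).foldl (fun row x =>
        if pvMatchA bm kernel oy ox y x then row.set x 1 else row) row))
    (List.replicate height (List.replicate width (0 : Int)))

def apply_hit_or_miss (binary_matrix : List (List Int)) (kernel_j : List (List Int)) (kernel_k : List (List Int)) : List (List Int) :=
  let erosion_j := pvErosion binary_matrix kernel_j
  let complement_matrix := binary_matrix.map (fun row => row.map (fun pixel => 1 - pixel))
  let erosion_k := pvErosion complement_matrix kernel_k
  let height := binary_matrix.length
  let width := (binary_matrix.getD 0 []).length
  (List.range height).foldl (fun res y =>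
    res.modify y (fun row =>
      (List.range width).foldl (fun row x =>
        if pvGet2 erosion_j y x == 1 && pvGet2 erosion_k y x == 1 then row.set x 1 else row) row))
    (List.replicate height (List.replicate width (0 : Int)))

-- ===== PORT B =====
-- B's single per-pixel test: border check for this kernel, then every 1-cell of the kernel
-- must cover a foreground (is_hit) resp. background (not is_hit) pixel
def pvMatchB (bm kernel : List (List Int)) (h w y x : Nat) (isHit : Bool) : Bool :=
  let oy := kernel.length / 2
  let ox := (kernel.getD 0 []).length / 2
  if oy ≤ y ∧ y + oy < h ∧ ox ≤ x ∧ x + ox < w then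
    (List.range kernel.length).all (fun i =>
      (List.range (kernel.getD 0 []).length).all (fun j =>
        pvGet2 kernel i j != 1 ||
          (if isHit then pvGet2 bm (y + i - oy) (x + j - ox) != 0
           else pvGet2 bm (y + i - oy) (x + j - ox) != 1)))
  else false

def apply_hit_or_miss_alt (binary_matrix : List (List Int)) (kernel_j : List (List Int)) (kernel_k : List (List Int)) : List (List Int) :=
  let height := binary_matrix.length
  let width := (binary_matrix.getD 0 []).length
  (List.range height).map (fun y =>
    (List.range width).map (fun x =>
      if pvMatchB binary_matrix kernel_j height width y x true &&
         pvMatchB binary_matrix kernel_k height width y x false then (1 : Int) else 0))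

-- ===== PRECONDITION & SPEC =====
-- Pre_ excludes empty inputs (A raises IndexError on `[0]`) and ragged inputs where some row is
-- shorter than the first row: on those A generally raises IndexError, though on a few of them
-- (short row never reached because the kernel is larger than the image) A still returns the zero
-- matrix, and B returns the same zero matrix there.
def Pre_apply_hit_or_miss (binary_matrix : List (List Int)) (kernel_j : List (List Int)) (kernel_k : List (List Int)) : Prop :=
  binary_matrix ≠ [] ∧ kernel_j ≠ [] ∧ kernel_k ≠ [] ∧
  (∀ row ∈ binary_matrix, (binary_matrix.getD 0 []).length ≤ row.length) ∧
  (∀ row ∈ kernel_j, (kernel_j.getD 0 []).length ≤ row.length) ∧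
  (∀ row ∈ kernel_k, (kernel_k.getD 0 []).length ≤ row.length)
instance (binary_matrix : List (List Int)) (kernel_j : List (List Int)) (kernel_k : List (List Int)) : Decidable (Pre_apply_hit_or_miss binary_matrix kernel_j kernel_k) := by unfold Pre_apply_hit_or_miss; infer_instance

def pvWitness_apply_hit_or_miss : List (List Int) × List (List Int) × List (List Int) :=
  ([[0, 1, 0], [1, 1, 1], [0, 1, 0]], [[1]], [[0, 1, 0]])

def Spec_apply_hit_or_miss (binary_matrix : List (List Int)) (kernel_j : List (List Int)) (kernel_k : List (List Int)) (out : List (List Int)) : Prop := out = apply_hit_or_miss_alt binary_matrix kernel_j kernel_k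
instance (binary_matrix : List (List Int)) (kernel_j : List (List Int)) (kernel_k : List (List Int)) (out : List (List Int)) : Decidable (Spec_apply_hit_or_miss binary_matrix kernel_j kernel_k out) := by unfold Spec_apply_hit_or_miss; infer_instance

-- ===== CLAIM (what is proved, stated in full; the proofs are below) =====
def Claim_equal_apply_hit_or_miss : Prop := ∀ (binary_matrix : List (List Int)) (kernel_j : List (List Int)) (kernel_k : List (List Int)), Dom_apply_hit_or_miss binary_matrix kernel_j kernel_k → Pre_apply_hit_or_miss binary_matrix kernel_j kernel_k → Spec_apply_hit_or_miss binary_matrix kernel_j kernel_k (apply_hit_or_miss binary_matrix kernel_j kernel_k)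

-- ===== LEMMAS AND PROOFS =====

-- a short-circuiting fold (Python's `break` pattern) is `all`
theorem pv_foldl_sc (f : Nat → Bool) (xs : List Nat) (b : Bool) :
    xs.foldl (fun m j => if m then f j else m) b = (b && xs.all f) := by
  induction xs generalizing b with
  | nil => simp
  | cons x xs ih =>
    cases b
    · simp [ih]
    · simp only [List.foldl_cons, List.all_cons, if_pos, Bool.true_and]
      rw [ih]

theorem pv_foldl_sc2 (f : Nat → Nat → Bool) (xs ys : List Nat) (b : Bool) :
    xs.foldl (fun m i => if m then ys.foldl (fun m2 j => if m2 then f i j else m2) m else m) b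
      = (b && xs.all (fun i => ys.all (f i))) := by
  induction xs generalizing b with
  | nil => simp
  | cons i xs ih =>
    cases b
    · simp [ih]
    · simp only [List.foldl_cons, if_pos, List.all_cons, Bool.true_and]
      rw [pv_foldl_sc, ih]
      cases hall : (ys.all (f i)) <;> simp

theorem pv_all_congr {α : Type} (l : List α) (p q : α → Bool) (h : ∀ a ∈ l, p a = q a) :
    l.all p = l.all q := by
  induction l with
  | nil => rfl
  | cons a l ih =>
    simp only [List.all_cons]
    rw [h a (by simp), ih (fun b hb => h b (by simp [hb]))]

theorem pv_getElem?_foldl_modify (g : Nat → List Int → List Int) (ys : List Nat) (m : List (List Int))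
    (hnd : ys.Nodup) (r : Nat) :
    (ys.foldl (fun m y => m.modify y (g y)) m)[r]? =
      if r ∈ ys then (g r) <$> m[r]? else m[r]? := by
  induction ys generalizing m with
  | nil => simp
  | cons y ys ih =>
    rcases List.nodup_cons.mp hnd with ⟨hy, hnd'⟩
    simp only [List.foldl_cons]
    rw [ih _ hnd']
    by_cases hr : r ∈ ys
    · have hry : r ≠ y := fun h => hy (h ▸ hr)
      simp only [List.getElem?_modify]
      rw [if_pos hr, if_pos (by simp [hr])]
      cases m[r]? <;> simp [Ne.symm hry]
    · by_cases hrey : r = y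
      · subst hrey
        simp only [List.getElem?_modify]
        rw [if_neg hr, if_pos (by simp)]
        cases m[r]? <;> simp
      · simp only [List.getElem?_modify]
        rw [if_neg hr, if_neg (by simp [hr, hrey])]
        cases m[r]? <;> simp
        intro h
        exact absurd h.symm hrey

theorem pv_length_foldl_setif (cond : Nat → Bool) (xs : List Nat) (row : List Int) :
    (xs.foldl (fun row x => if cond x then row.set x 1 else row) row).length = row.length := by
  induction xs generalizing row with
  | nil => rfl
  | cons x xs ih =>
    simp only [List.foldl_cons]
    by_cases hc : cond x = true <;> simp [hc, ih, List.length_set]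

theorem pv_getD_foldl_setif (cond : Nat → Bool) (xs : List Nat) (row : List Int)
    (hnd : xs.Nodup) (hlt : ∀ x ∈ xs, x < row.length) (c : Nat) :
    (xs.foldl (fun row x => if cond x then row.set x 1 else row) row).getD c 0 =
      if c ∈ xs ∧ cond c = true then 1 else row.getD c 0 := by
  induction xs generalizing row with
  | nil => simp
  | cons x xs ih =>
    rcases List.nodup_cons.mp hnd with ⟨hx, hnd'⟩
    have hxlt : x < row.length := hlt x (by simp)
    simp only [List.foldl_cons]
    by_cases hc : cond x = true
    · rw [if_pos hc, ih _ hnd' (fun z hz => by rw [List.length_set]; exact hlt z (by simp [hz]))]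
      by_cases hcx : c ∈ xs
      · have hcnx : c ≠ x := fun h => hx (h ▸ hcx)
        simp only [List.mem_cons, hcx, or_true, true_and]
        rw [List.getD_eq_getElem?_getD, List.getD_eq_getElem?_getD, List.getElem?_set,
          if_neg (fun h : x = c => hcnx h.symm)]
      · by_cases hcex : c = x
        · subst hcex
          simp [hcx, hc, List.getD_eq_getElem?_getD, hxlt]
        · simp only [List.mem_cons, hcx, hcex, or_self, false_and, if_false]
          rw [List.getD_eq_getElem?_getD, List.getD_eq_getElem?_getD, List.getElem?_set,
            if_neg (fun h : x = c => hcex h.symm)]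
    · rw [if_neg hc, ih _ hnd' (fun z hz => hlt z (by simp [hz]))]
      by_cases hcex : c = x
      · subst hcex
        simp only [List.mem_cons, true_or, true_and, hc]
        simp
      · simp [hcex]

-- pvMatchA with the breaks removed: an `all` over the kernel cells
theorem pvMatchA_eq_all (bm kernel : List (List Int)) (oy ox y x : Nat) :
    pvMatchA bm kernel oy ox y x =
      (List.range kernel.length).all (fun i =>
        (List.range (kernel.getD 0 []).length).all (fun j =>
          pvGet2 kernel i j != 1 || pvGet2 bm (y + i - oy) (x + j - ox) != 0)) := by
  unfold pvMatchA
  rw [pv_foldl_sc2 (fun i j =>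
    if pvGet2 kernel i j == 1 then
      if pvGet2 bm (y + i - oy) (x + j - ox) == 0 then false else true
    else true)]
  rw [Bool.true_and]
  apply pv_all_congr
  intro i _
  apply pv_all_congr
  intro j _
  cases h1 : pvGet2 kernel i j == 1 <;>
    cases h2 : pvGet2 bm (y + i - oy) (x + j - ox) == 0 <;> simp [h1, h2, bne]

-- cell characterisation of A's erosion result
theorem pvErosion_getD (bm kernel : List (List Int)) (y x : Nat)
    (hy : y < bm.length) (hx : x < (bm.getD 0 []).length) :
    pvGet2 (pvErosion bm kernel) y x =
      (if (kernel.length / 2 ≤ y ∧ y + kernel.length / 2 < bm.length ∧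
           (kernel.getD 0 []).length / 2 ≤ x ∧ x + (kernel.getD 0 []).length / 2 < (bm.getD 0 []).length) ∧
          pvMatchA bm kernel (kernel.length / 2) ((kernel.getD 0 []).length / 2) y x = true
       then 1 else 0) := by
  have hyiff : y ∈ List.range' (kernel.length / 2) (bm.length - kernel.length / 2 - kernel.length / 2) ↔
      (kernel.length / 2 ≤ y ∧ y + kernel.length / 2 < bm.length) := by
    rw [List.mem_range'_1]; omega
  have hxiff : x ∈ List.range' ((kernel.getD 0 []).length / 2)
      ((bm.getD 0 []).length - (kernel.getD 0 []).length / 2 - (kernel.getD 0 []).length / 2) ↔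
      ((kernel.getD 0 []).length / 2 ≤ x ∧ x + (kernel.getD 0 []).length / 2 < (bm.getD 0 []).length) := by
    rw [List.mem_range'_1]; omega
  simp only [pvErosion, pvGet2]
  rw [List.getD_eq_getElem?_getD (a := ([] : List Int)), pv_getElem?_foldl_modify _ _ _ (List.nodup_range' 1)]
  by_cases hmem : y ∈ List.range' (kernel.length / 2) (bm.length - kernel.length / 2 - kernel.length / 2)
  · rw [if_pos hmem]
    rw [List.getElem?_replicate, if_pos hy]
    simp only [Option.map_eq_map, Option.map_some, Option.getD_some]
    rw [pv_getD_foldl_setif _ _ _ (List.nodup_range' 1)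
      (fun z hz => by rw [List.mem_range'_1] at hz; simp only [List.length_replicate]; omega)]
    rw [List.getD_replicate]
    · rw [hyiff] at hmem
      by_cases hxm : x ∈ List.range' ((kernel.getD 0 []).length / 2)
          ((bm.getD 0 []).length - (kernel.getD 0 []).length / 2 - (kernel.getD 0 []).length / 2)
      · rw [hxiff] at hxm
        by_cases hmt : pvMatchA bm kernel (kernel.length / 2) ((kernel.getD 0 []).length / 2) y x = true
        · rw [if_pos ⟨by rw [hxiff]; exact hxm, hmt⟩, if_pos ⟨⟨hmem.1, hmem.2, hxm.1, hxm.2⟩, hmt⟩]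
        · rw [if_neg (fun h => hmt h.2), if_neg (fun h => hmt h.2)]
      · rw [if_neg (fun h => hxm h.1), if_neg (fun h => hxm (by rw [hxiff]; exact ⟨h.1.2.2.1, h.1.2.2.2⟩))]
    · exact hx
  · rw [if_neg hmem]
    rw [List.getElem?_replicate, if_pos hy]
    simp only [Option.getD_some]
    rw [List.getD_replicate _ hx]
    rw [hyiff] at hmem
    rw [if_neg (fun h => hmem ⟨h.1.1, h.1.2.1⟩)]

-- the complement matrix, cellwise
theorem pv_comp_getD (bm : List (List Int)) (r : Nat) :
    ((bm.map (fun row => row.map (fun pixel => 1 - pixel))).getD r []) =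
      (bm.getD r []).map (fun pixel => 1 - pixel) := by
  rw [List.getD_eq_getElem?_getD, List.getD_eq_getElem?_getD, List.getElem?_map]
  cases bm[r]? <;> simp

-- erosion-J cell as B's hit test
theorem pv_hit_eq (bm kj : List (List Int)) (y x : Nat)
    (hy : y < bm.length) (hx : x < (bm.getD 0 []).length) :
    (pvGet2 (pvErosion bm kj) y x == 1) = pvMatchB bm kj bm.length (bm.getD 0 []).length y x true := by
  rw [pvErosion_getD bm kj y x hy hx, pvMatchA_eq_all]
  unfold pvMatchB
  split_ifs with h1 h2 h3 <;> simp_all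

-- erosion-K-of-complement cell as B's miss test
theorem pv_miss_eq (bm kk : List (List Int)) (y x : Nat)
    (hy : y < bm.length) (hx : x < (bm.getD 0 []).length)
    (hrows : ∀ row ∈ bm, (bm.getD 0 []).length ≤ row.length) :
    (pvGet2 (pvErosion (bm.map (fun row => row.map (fun pixel => 1 - pixel))) kk) y x == 1) =
      pvMatchB bm kk bm.length (bm.getD 0 []).length y x false := by
  have hy' : y < (bm.map (fun row => row.map (fun pixel => (1 : Int) - pixel))).length := by
    rw [List.length_map]; exact hy
  have hx' : x < ((bm.map (fun row => row.map (fun pixel => (1 : Int) - pixel))).getD 0 []).length := by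
    rw [pv_comp_getD, List.length_map]; exact hx
  rw [pvErosion_getD _ kk y x hy' hx']
  simp only [List.length_map, pv_comp_getD]
  unfold pvMatchB
  by_cases hb : (kk.length / 2 ≤ y ∧ y + kk.length / 2 < bm.length ∧
      (kk.getD 0 []).length / 2 ≤ x ∧ x + (kk.getD 0 []).length / 2 < (bm.getD 0 []).length)
  · have hcell : ∀ i ∈ List.range kk.length, ∀ j ∈ List.range (kk.getD 0 []).length,
        (pvGet2 (bm.map (fun row => row.map (fun pixel => (1 : Int) - pixel)))
            (y + i - kk.length / 2) (x + j - (kk.getD 0 []).length / 2) != 0) =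
        (pvGet2 bm (y + i - kk.length / 2) (x + j - (kk.getD 0 []).length / 2) != 1) := by
      intro i hi j hj
      rw [List.mem_range] at hi hj
      set r' := y + i - kk.length / 2 with hr'
      set c' := x + j - (kk.getD 0 []).length / 2 with hc'
      have hrlt : r' < bm.length := by rw [hr']; omega
      have hclt : c' < (bm.getD 0 []).length := by rw [hc']; omega
      have hrowmem : bm.getD r' [] ∈ bm := by
        rw [List.getD_eq_getElem _ _ hrlt]; exact List.getElem_mem _
      have hrowlen : c' < (bm.getD r' []).length := lt_of_lt_of_le hclt (hrows _ hrowmem)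
      have : pvGet2 (bm.map (fun row => row.map (fun pixel => (1 : Int) - pixel))) r' c' =
          1 - pvGet2 bm r' c' := by
        unfold pvGet2
        rw [pv_comp_getD]
        rw [List.getD_eq_getElem _ _ (by rw [List.length_map]; exact hrowlen),
          List.getD_eq_getElem _ _ hrowlen, List.getElem_map]
      rw [this]
      rw [Bool.eq_iff_iff]
      simp only [bne_iff_ne, ne_eq, not_iff_not]
      constructor <;> intro h <;> omega
    rw [pvMatchA_eq_all]
    simp only [Bool.false_eq_true, if_false]
    have halleq : ((List.range kk.length).all fun i =>
        (List.range (kk.getD 0 []).length).all fun j =>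
          pvGet2 kk i j != 1 ||
            pvGet2 (bm.map (fun row => row.map (fun pixel => (1 : Int) - pixel)))
              (y + i - kk.length / 2) (x + j - (kk.getD 0 []).length / 2) != 0)
        = ((List.range kk.length).all fun i =>
        (List.range (kk.getD 0 []).length).all fun j =>
          pvGet2 kk i j != 1 ||
            pvGet2 bm (y + i - kk.length / 2) (x + j - (kk.getD 0 []).length / 2) != 1) := by
      apply pv_all_congr
      intro i hi
      apply pv_all_congr
      intro j hj
      rw [hcell i hi j hj]
    rw [halleq, if_pos hb]
    cases hall : ((List.range kk.length).all fun i =>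
        (List.range (kk.getD 0 []).length).all fun j =>
          pvGet2 kk i j != 1 ||
            pvGet2 bm (y + i - kk.length / 2) (x + j - (kk.getD 0 []).length / 2) != 1)
    · rw [if_neg (fun h => absurd h.2 (by simp))]
      simp
    · rw [if_pos ⟨hb, rfl⟩]
      simp
  · rw [pvMatchA_eq_all, if_neg (fun h => hb h.1), if_neg hb]
    simp

-- ===== VERDICT (by name: the statement is the Claim_ definition above) =====
theorem apply_hit_or_miss_spec : Claim_equal_apply_hit_or_miss := by
  intro bm kj kk _hdom hpre
  unfold Spec_apply_hit_or_miss
  obtain ⟨-, -, -, hrows, -, -⟩ := hpre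
  simp only [apply_hit_or_miss, apply_hit_or_miss_alt]
  apply List.ext_getElem?
  intro r
  rw [pv_getElem?_foldl_modify _ _ _ List.nodup_range]
  by_cases hr : r < bm.length
  · rw [if_pos (List.mem_range.mpr hr), List.getElem?_replicate, if_pos hr]
    rw [List.getElem?_map, List.getElem?_range hr]
    simp only [Option.map_eq_map, Option.map_some, Option.some.injEq]
    apply List.ext_getElem
    · rw [pv_length_foldl_setif, List.length_replicate]
      simp
    · intro c hc1 hc2
      have hcw : c < (bm.getD 0 []).length := by
        rw [pv_length_foldl_setif, List.length_replicate] at hc1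
        exact hc1
      simp only [List.getElem_map, List.getElem_range]
      rw [← List.getD_eq_getElem _ 0 hc1]
      rw [pv_getD_foldl_setif _ _ _ List.nodup_range
        (fun z hz => by rw [List.mem_range] at hz; simp only [List.length_replicate]; exact hz)]
      rw [pv_hit_eq bm kj r c hr hcw, pv_miss_eq bm kk r c hr hcw hrows]
      by_cases hcond : (pvMatchB bm kj bm.length (bm.getD 0 []).length r c true &&
          pvMatchB bm kk bm.length (bm.getD 0 []).length r c false) = true
      · rw [if_pos ⟨List.mem_range.mpr hcw, hcond⟩, if_pos hcond]
      · rw [if_neg (fun h => hcond h.2), if_neg hcond, List.getD_replicate _ hcw]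
  · rw [if_neg (fun h => hr (List.mem_range.mp h)), List.getElem?_replicate, if_neg hr]
    rw [List.getElem?_map]
    have : (List.range bm.length)[r]? = none := by
      rw [List.getElem?_eq_none]
      simpa using Nat.le_of_not_lt hr
    rw [this]
    rfl
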